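-- pv_equiv track=rewrite | github.com/ding-haijie/SAN_D2T | preprocess/data_preprocess.py | reverse_pos
-- ===== SOURCE A (Python) =====
-- def reverse_pos(box_pos):
--     """ Reverse field_position """
--     temp_pos, reversed_pos = [], []
--     for pos in box_pos:
--         if int(pos) == 1 and len(temp_pos) != 0:
--             reversed_pos.extend(temp_pos[::-1])
--             temp_pos = []
--         temp_pos.append(pos)
--     reversed_pos.extend(temp_pos[::-1])
--     return reversed_pos
-- ===== SOURCE B (Python) =====
-- def reverse_pos(box_pos):
--     """ Reverse field_position """
--     n = len(box_pos)
--     # run start indices: index 0 always starts a run, and every position holding a 1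
--     starts = [i for i, pos in enumerate(box_pos) if i == 0 or int(pos) == 1]
--     starts.append(n)
--     out = [0] * n
--     # scatter: element i of run [s, e) lands at mirrored index s + e - 1 - i
--     for s, e in zip(starts, starts[1:]):
--         for i in range(s, e):
--             out[s + e - 1 - i] = box_pos[i]
--     return out
-- ===== Notes on version B (the rewrite author's own statement) =====
-- stated objective: alternative
-- what changed: B never reverses or buffers a run: it collects the run start indices in one pass, then scatters each element directly to its mirrored target index s+e-1-i inside a preallocated output array, instead of A's streaming flush of a temp buffer with list reversal.
import Mathlib
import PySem

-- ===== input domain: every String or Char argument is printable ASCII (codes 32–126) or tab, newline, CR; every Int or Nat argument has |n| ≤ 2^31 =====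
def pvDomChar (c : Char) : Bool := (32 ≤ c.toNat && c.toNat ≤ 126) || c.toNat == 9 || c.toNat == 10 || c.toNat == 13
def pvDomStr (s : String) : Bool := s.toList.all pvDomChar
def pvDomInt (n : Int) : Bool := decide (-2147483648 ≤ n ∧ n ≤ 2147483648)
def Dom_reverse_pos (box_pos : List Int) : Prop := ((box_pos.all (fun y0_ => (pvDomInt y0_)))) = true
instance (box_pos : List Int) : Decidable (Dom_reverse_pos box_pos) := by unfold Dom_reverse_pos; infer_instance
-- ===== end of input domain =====

-- B replaces A's streaming reverse-and-flush of a temp buffer by an index-arithmetic scatter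
-- (run starts collected once, each element written to its mirrored slot); alternative algorithm, same cost.

-- ===== PORT A =====
-- single pass: state (temp_pos, reversed_pos); flush temp reversed when pos == 1 and temp nonempty
def reverse_pos (box_pos : List Int) : List Int :=
  let s := box_pos.foldl
    (fun (st : List Int × List Int) pos =>
      let st' := if pos = 1 ∧ st.1.length ≠ 0 then ([], st.2 ++ st.1.reverse) else st
      (st'.1 ++ [pos], st'.2))
    ([], [])
  s.2 ++ s.1.reverse

-- ===== PORT B =====
-- run start indices, then scatter each element to its mirrored index; box_pos[i] and out[idx]=v are
-- exact via pyGetD/pySetD (the loop bounds keep every index in range, where they equal Python's indexing)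
def reverse_pos_alt (box_pos : List Int) : List Int :=
  let n : Int := box_pos.length
  let starts : List Int :=
    ((PySem.List.enumerate box_pos).filter (fun p => p.1 == 0 || p.2 == 1)).map (·.1) ++ [n]
  let out : List Int := List.replicate box_pos.length 0
  (starts.zip starts.tail).foldl
    (fun out se =>
      (PySem.List.pyRange se.1 se.2 1).foldl
        (fun out i => PySem.List.pySetD out (se.1 + se.2 - 1 - i) (PySem.List.pyGetD box_pos i 0)) out)
    out

-- ===== PRECONDITION & SPEC =====
def Spec_reverse_pos (box_pos : List Int) (out : List Int) : Prop := out = reverse_pos_alt box_pos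
instance (box_pos : List Int) (out : List Int) : Decidable (Spec_reverse_pos box_pos out) := by unfold Spec_reverse_pos; infer_instance

-- ===== CLAIM =====
def Claim_equal_reverse_pos : Prop := ∀ (box_pos : List Int), Dom_reverse_pos box_pos → Spec_reverse_pos box_pos (reverse_pos box_pos)

-- ===== LEMMAS AND PROOFS =====

-- proof-side view shared by the two lemma chains: the run groups of the input
def rpGroups : List Int → List Int → List (List Int)
  | [], cur => [cur]
  | p :: rest, cur => if p = 1 then cur :: rpGroups rest [p] else rpGroups rest (cur ++ [p])

-- start offsets of a group list
def startsOf : List (List Int) → Int → List Int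
  | [], _ => []
  | g :: gs, s => s :: startsOf gs (s + g.length)

-- indices ≥ k (in the remainder) holding a 1
def posOf1 : List Int → Int → List Int
  | [], _ => []
  | y :: ys, k => if y = 1 then k :: posOf1 ys (k + 1) else posOf1 ys (k + 1)

lemma rp_key (rest : List Int) : ∀ (cur rev : List Int), cur ≠ [] →
    (let s := rest.foldl
      (fun (st : List Int × List Int) pos =>
        let st' := if pos = 1 ∧ st.1.length ≠ 0 then ([], st.2 ++ st.1.reverse) else st
        (st'.1 ++ [pos], st'.2)) (cur, rev)
     s.2 ++ s.1.reverse) = rev ++ (rpGroups rest cur).flatMap List.reverse := by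
  induction rest with
  | nil => intro cur rev _; simp [rpGroups]
  | cons p rest ih =>
    intro cur rev hcur
    simp only [List.foldl_cons, rpGroups]
    by_cases hp : p = 1
    · have hlen : cur.length ≠ 0 := by simpa using hcur
      simp only [hp, hlen, ne_eq, not_false_eq_true, and_self, if_true, List.nil_append]
      rw [ih [1] (rev ++ cur.reverse) (by simp)]
      simp [List.flatMap_cons]
    · simp only [hp, false_and, if_false]
      rw [ih (cur ++ [p]) rev (by simp)]

lemma flat_groups (rest : List Int) : ∀ cur, (rpGroups rest cur).flatten = cur ++ rest := by
  induction rest with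
  | nil => intro cur; simp [rpGroups]
  | cons p rest ih =>
    intro cur
    by_cases hp : p = 1
    · simp [rpGroups, hp, ih]
    · simp [rpGroups, hp, ih]

lemma startsOf_groups (rest : List Int) : ∀ (cur : List Int) (k : Int),
    startsOf (rpGroups rest cur) (k - cur.length) = (k - cur.length) :: posOf1 rest k := by
  induction rest with
  | nil => intro cur k; simp [rpGroups, startsOf, posOf1]
  | cons p rest ih =>
    intro cur k
    by_cases hp : p = 1
    · subst hp
      have h := ih [1] (k + 1)
      norm_num at h
      simp only [rpGroups, if_true, startsOf, posOf1]
      have e : k - (cur.length : Int) + cur.length = k := by ring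
      rw [e, h]
    · have h := ih (cur ++ [p]) (k + 1)
      simp only [List.length_append, List.length_cons, List.length_nil] at h
      push_cast at h
      have e : (k : Int) + 1 - (cur.length + 1) = k - cur.length := by ring
      rw [e] at h
      simp only [rpGroups, hp, if_false, posOf1]
      exact h

lemma enum_filter_aux (xs : List Int) : ∀ (k : Int), 1 ≤ k →
    ((PySem.List.enumerate xs k).filter (fun p => p.1 == 0 || p.2 == 1)).map (·.1) = posOf1 xs k := by
  induction xs with
  | nil => intro k _; simp [PySem.List.enumerate_nil, posOf1]
  | cons y ys ih =>
    intro k hk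
    rw [PySem.List.enumerate_cons]
    have hk0 : (k == (0 : Int)) = false := by simp; omega
    by_cases hy : y = 1
    · simp [hk0, hy, posOf1, ih (k + 1) (by omega)]
    · simp [hk0, hy, posOf1, ih (k + 1) (by omega)]

lemma enum_filter (x : Int) (xs : List Int) :
    ((PySem.List.enumerate (x :: xs)).filter (fun p => p.1 == 0 || p.2 == 1)).map (·.1)
      = 0 :: posOf1 xs 1 := by
  rw [PySem.List.enumerate_cons]
  simp only [List.filter_cons]
  simp [enum_filter_aux xs 1 (by omega)]

-- the inner scatter loop: writes bp's segment [a,e) reversed into out at positions [s, s+e-a)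
lemma inner_loop (bp : List Int) (s e : Int) : ∀ (n : Nat) (a : Int) (out : List Int),
    (e - a).toNat = n → s ≤ a → a ≤ e → e ≤ (out.length : Int) → 0 ≤ s →
    (PySem.List.pyRange a e 1).foldl
        (fun o i => PySem.List.pySetD o (s + e - 1 - i) (PySem.List.pyGetD bp i 0)) out
      = out.take s.toNat ++ ((PySem.List.pyRange a e 1).map (fun i => PySem.List.pyGetD bp i 0)).reverse
          ++ out.drop (s + e - a).toNat := by
  intro n
  induction n with
  | zero =>
    intro a out h0 hsa hae hel hs
    have hea : e = a := by omega
    subst hea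
    rw [PySem.List.pyRange_one_eq_nil le_rfl]
    simp only [List.foldl_nil, List.map_nil, List.reverse_nil]
    have hse : s + e - e = s := by ring
    rw [hse, List.append_nil, List.take_append_drop]
  | succ n ih =>
    intro a out h0 hsa hae hel hs
    have hlt : a < e := by omega
    rw [PySem.List.pyRange_one_cons hlt]
    simp only [List.foldl_cons, List.map_cons, List.reverse_cons]
    rw [PySem.List.pySetD_of_nonneg out (PySem.List.pyGetD bp a 0) (by omega)]
    rw [ih (a + 1) (out.set (s + e - 1 - a).toNat (PySem.List.pyGetD bp a 0))
      (by omega) (by omega) (by omega) (by rw [List.length_set]; exact hel) hs]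
    have t1 : (out.set (s + e - 1 - a).toNat (PySem.List.pyGetD bp a 0)).take s.toNat
        = out.take s.toNat := List.take_set_of_le (by omega)
    have t2 : (out.set (s + e - 1 - a).toNat (PySem.List.pyGetD bp a 0)).drop (s + e - (a + 1)).toNat
        = PySem.List.pyGetD bp a 0 :: out.drop (s + e - a).toNat := by
      have hje : (s + e - (a + 1)).toNat = (s + e - 1 - a).toNat := by omega
      rw [hje, List.drop_eq_getElem_cons (by rw [List.length_set]; omega),
        List.getElem_set_self, List.drop_set_of_lt (by omega)]
      have : (s + e - 1 - a).toNat + 1 = (s + e - a).toNat := by omega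
      rw [this]
    rw [t1, t2]
    simp [List.append_assoc]

-- reading bp's segment by index yields the segment
lemma seg_map (pre g post : List Int) :
    (PySem.List.pyRange (pre.length : Int) ((pre.length : Int) + (g.length : Int)) 1).map
        (fun i => PySem.List.pyGetD (pre ++ g ++ post) i 0) = g := by
  apply List.ext_getElem
  · simp [PySem.List.length_pyRange_one]
  · intro k h1 h2
    simp only [List.getElem_map, PySem.List.getElem_pyRange_one]
    have hk : k < g.length := by
      simpa [PySem.List.length_pyRange_one] using h2
    rw [PySem.List.pyGetD_eq_getElem _ _ (by omega)
      (by simp only [List.length_append]; push_cast; omega)]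
    have ht : ((pre.length : Int) + (k : Int)).toNat = pre.length + k := by omega
    simp only [ht]
    rw [List.getElem_append_left (by simp only [List.length_append]; omega),
      List.getElem_append_right (by omega)]
    simp

-- the outer loop over consecutive start pairs
lemma outer_loop (bp : List Int) : ∀ (gs : List (List Int)) (w rest : List Int),
    w.length ≤ bp.length → bp.drop w.length = gs.flatten → rest.length = gs.flatten.length →
    ((startsOf gs (w.length : Int) ++ [(w.length : Int) + (gs.flatten.length : Int)]).zip
        ((startsOf gs (w.length : Int) ++ [(w.length : Int) + (gs.flatten.length : Int)]).tail)).foldl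
      (fun out se =>
        (PySem.List.pyRange se.1 se.2 1).foldl
          (fun out i => PySem.List.pySetD out (se.1 + se.2 - 1 - i) (PySem.List.pyGetD bp i 0)) out)
      (w ++ rest)
    = w ++ gs.flatMap List.reverse := by
  intro gs
  induction gs with
  | nil =>
    intro w rest _ _ hrlen
    have hr : rest = [] := by simpa using hrlen
    subst hr
    simp [startsOf]
  | cons g gs ih =>
    intro w rest hwlen hdrop hrlen
    have hflat : (g :: gs).flatten = g ++ gs.flatten := by simp
    have hN : ((w.length : Int) + ((g :: gs).flatten.length : Int))
        = ((w.length : Int) + (g.length : Int)) + (gs.flatten.length : Int) := by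
      simp only [List.flatten_cons, List.length_append]; push_cast; ring
    rw [hN]
    obtain ⟨T', hT⟩ : ∃ T',
        startsOf gs ((w.length : Int) + (g.length : Int))
          ++ [((w.length : Int) + (g.length : Int)) + (gs.flatten.length : Int)]
        = (((w.length : Int) + (g.length : Int))) :: T' := by
      cases gs with
      | nil => exact ⟨[], by simp [startsOf]⟩
      | cons g' gs' =>
        exact ⟨_, by rw [show startsOf (g' :: gs') ((w.length : Int) + (g.length : Int))
          = ((w.length : Int) + (g.length : Int))
            :: startsOf gs' (((w.length : Int) + (g.length : Int)) + g'.length) from rfl,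
          List.cons_append]⟩
    simp only [startsOf, List.cons_append, hT, List.tail_cons, List.zip_cons_cons, List.foldl_cons]
    have hdl : (bp.drop w.length).length = g.length + gs.flatten.length := by
      rw [hdrop]; simp
    have hbp : bp.length = w.length + g.length + gs.flatten.length := by
      have := List.length_drop (l := bp) (i := w.length)
      omega
    have hlen2 : (w ++ rest).length = w.length + g.length + gs.flatten.length := by
      simp [hrlen]; omega
    have hinner := inner_loop bp (w.length : Int) ((w.length : Int) + (g.length : Int))
      g.length (w.length : Int) (w ++ rest) (by omega) (by omega) (by omega)
      (by rw [hlen2]; push_cast; omega) (by omega)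
    rw [hinner]
    have hprelen : (bp.take w.length).length = w.length := by
      rw [List.length_take]; omega
    have hpre : bp = bp.take w.length ++ g ++ gs.flatten := by
      conv_lhs => rw [← List.take_append_drop w.length bp, hdrop, hflat]
      simp [List.append_assoc]
    have hmap : ((PySem.List.pyRange (w.length : Int) ((w.length : Int) + (g.length : Int)) 1).map
        (fun i => PySem.List.pyGetD bp i 0)) = g := by
      have h := seg_map (bp.take w.length) g gs.flatten
      rw [hprelen, ← hpre] at h
      exact h
    have htake : (w ++ rest).take ((w.length : Int)).toNat = w := by
      simp
    have hdrop2 : (w ++ rest).drop (((w.length : Int) + ((w.length : Int) + (g.length : Int))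
        - (w.length : Int))).toNat = rest.drop g.length := by
      have he : (((w.length : Int) + ((w.length : Int) + (g.length : Int))
          - (w.length : Int))).toNat = w.length + g.length := by omega
      rw [he, List.drop_append]
      rw [List.drop_eq_nil_of_le (by omega)]
      simp
    rw [hmap, htake, hdrop2]
    have hih := ih (w ++ g.reverse) (rest.drop g.length)
      (by simp only [List.length_append, List.length_reverse]; omega)
      (by
        have h := congrArg (List.drop g.length) hdrop
        rw [List.drop_drop, hflat, List.drop_left] at h
        simp only [List.length_append, List.length_reverse]
        exact h)
      (by simp only [List.length_drop, hrlen, List.flatten_cons, List.length_append]; omega)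
    have hcast : (((w ++ g.reverse).length : Int)) = (w.length : Int) + (g.length : Int) := by
      push_cast [List.length_append, List.length_reverse]; ring
    rw [hcast, hT] at hih
    simp only [List.tail_cons] at hih
    rw [hih]
    simp [List.flatMap_cons, List.append_assoc]

-- ===== VERDICT =====
theorem reverse_pos_spec : Claim_equal_reverse_pos := by
  intro box_pos _
  unfold Spec_reverse_pos reverse_pos reverse_pos_alt
  cases box_pos with
  | nil => rfl
  | cons x xs =>
    -- A side: discharge the first iteration (empty temp never flushes), then rp_key
    have hstep : ((x :: xs).foldl
        (fun (st : List Int × List Int) pos =>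
          let st' := if pos = 1 ∧ st.1.length ≠ 0 then ([], st.2 ++ st.1.reverse) else st
          (st'.1 ++ [pos], st'.2)) ([], []))
        = (xs.foldl
        (fun (st : List Int × List Int) pos =>
          let st' := if pos = 1 ∧ st.1.length ≠ 0 then ([], st.2 ++ st.1.reverse) else st
          (st'.1 ++ [pos], st'.2)) ([x], [])) := by
      rw [List.foldl_cons]
      norm_num
    have hA := rp_key xs [x] [] (by simp)
    -- B side: identify the start list and apply the outer scatter loop
    have hst : startsOf (rpGroups xs [x]) 0 = 0 :: posOf1 xs 1 := by
      have h := startsOf_groups xs [x] 1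
      norm_num at h
      exact h
    have houter := outer_loop (x :: xs) (rpGroups xs [x]) [] (List.replicate (x :: xs).length 0)
      (by simp)
      (by simpa using (flat_groups xs [x]).symm)
      (by simp [flat_groups])
    simp only [List.length_nil, Nat.cast_zero, List.nil_append, zero_add, flat_groups] at houter
    simp only [hstep]
    rw [hA]
    rw [enum_filter x xs, ← hst]
    simp only [List.nil_append] at houter ⊢
    exact houter.symm
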